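-- pv_equiv track=rewrite | github.com/Rethy729/BaekJoon | BFS_DFS_다익스트라/단지번호붙이기.py | grid_to_graph
-- ===== SOURCE A (Python) =====
-- def grid_to_graph(n, grid):
--     graph = [[] for _ in range(n * n + 1)] #graph의 index는 1-based / (1,1)에 해당하는 node는 1이고, (n, m)에 해당하는 node는 nm+1이다
--     graph_zero_one = [False] * (n * n + 1) #집이 있는 위치만 나열한 list (0or1)
--
--     for i in range(n):
--         for j in range(n):
--             if grid[i][j] == '1':
--                 graph_zero_one[i*n+ j + 1] = True
--             if i != n-1:
--                 if grid[i][j] == '1' and grid[i+1][j] == '1':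
--                     graph[i*n+ j + 1].append((i+1)*n + j + 1)
--                     graph[(i+1)*n + j + 1].append(i*n + j + 1)
--             if j != n-1:
--                 if grid[i][j] == '1' and grid[i][j+1] == '1':
--                     graph[i*n + j + 1].append(i*n + j + 2)
--                     graph[i*n+ j + 2].append(i*n + j + 1)
--     return graph, graph_zero_one
-- ===== SOURCE B (Python) =====
-- def grid_to_graph(n, grid):
--     size = n * n + 1
--     # stage 1: read the grid once into a flat 1-based boolean table
--     house = [False] * size
--     if n > 0:
--         for v in range(1, size):
--             house[v] = grid[(v - 1) // n][(v - 1) % n] == '1'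
--     # stage 2: derive every adjacency list from the table alone, in flat index space
--     graph = []
--     for v in range(size):
--         nbrs = []
--         if v > 0 and house[v]:
--             i, j = divmod(v - 1, n)
--             if i > 0 and house[v - n]:
--                 nbrs.append(v - n)
--             if j > 0 and house[v - 1]:
--                 nbrs.append(v - 1)
--             if i < n - 1 and house[v + n]:
--                 nbrs.append(v + n)
--             if j < n - 1 and house[v + 1]:
--                 nbrs.append(v + 1)
--         graph.append(nbrs)
--     return graph, house
-- ===== Notes on version B (the rewrite author's own statement) =====
-- stated objective: alternative
-- what changed: B replaces A's edge-centric 2D scan (which appends both endpoints of every down/right edge into two different preallocated lists) by two staged passes over flat 1-based node indices: it first reads the grid once into a flat boolean table, then derives each node's whole adjacency list from that table alone by divmod index arithmetic, never touching the grid again.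
import Mathlib
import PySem

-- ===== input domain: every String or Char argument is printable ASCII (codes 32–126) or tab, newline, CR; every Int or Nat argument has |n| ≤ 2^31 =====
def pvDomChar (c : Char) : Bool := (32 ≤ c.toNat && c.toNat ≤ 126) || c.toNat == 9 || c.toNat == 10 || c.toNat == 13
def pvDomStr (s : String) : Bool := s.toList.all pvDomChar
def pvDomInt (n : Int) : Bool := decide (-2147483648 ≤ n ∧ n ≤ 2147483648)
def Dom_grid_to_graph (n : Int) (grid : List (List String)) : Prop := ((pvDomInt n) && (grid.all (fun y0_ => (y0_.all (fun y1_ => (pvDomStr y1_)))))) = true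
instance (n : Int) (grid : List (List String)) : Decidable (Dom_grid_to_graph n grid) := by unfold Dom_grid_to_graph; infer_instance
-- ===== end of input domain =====

-- B re-implements the construction in two staged passes over flat node indices: it first
-- reads the grid once into a flat boolean table, then derives each adjacency list from
-- that table alone by index arithmetic; objective: alternative decomposition, same outputs.

-- ===== PORT A =====
-- grid[i][j] == '1'  (A's cell test; pyGetD is exact on the in-range indices Pre_ guarantees)
def pvHouse (grid : List (List String)) (i j : Int) : Bool :=
  PySem.List.pyGetD (PySem.List.pyGetD grid i []) j "" == "1"

-- graph[v].append(x); in A, v is always a non-negative in-range index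
def pvAppendAt (g : List (List Int)) (v : Int) (x : Int) : List (List Int) :=
  g.modify v.toNat (fun l => l ++ [x])

-- [[] for _ in range(n*n+1)]  and  [False] * (n*n+1)
def pvGraph0 (n : Int) : List (List Int) :=
  (PySem.List.pyRange 0 (n * n + 1) 1).map (fun _ => [])
def pvZero0 (n : Int) : List Bool := List.replicate (n * n + 1).toNat false

-- body of A's loop acting on graph: the down-edge block, then the right-edge block
def pvGStepA (n : Int) (grid : List (List String)) (g : List (List Int)) (i j : Int) :
    List (List Int) :=
  let g1 := if i ≠ n - 1 then
      (if pvHouse grid i j && pvHouse grid (i + 1) j then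
        pvAppendAt (pvAppendAt g (i * n + j + 1) ((i + 1) * n + j + 1))
          ((i + 1) * n + j + 1) (i * n + j + 1)
      else g)
    else g
  if j ≠ n - 1 then
      (if pvHouse grid i j && pvHouse grid i (j + 1) then
        pvAppendAt (pvAppendAt g1 (i * n + j + 1) (i * n + j + 2))
          (i * n + j + 2) (i * n + j + 1)
      else g1)
    else g1

-- graph_zero_one[i*n+j+1] = True when grid[i][j] == '1'
def pvZStep (n : Int) (grid : List (List String)) (z : List Bool) (i j : Int) : List Bool :=
  if pvHouse grid i j then PySem.List.pySetD z (i * n + j + 1) true else z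

def grid_to_graph (n : Int) (grid : List (List String)) : List (List Int) × List Bool :=
  (PySem.List.pyRange 0 n 1).foldl (fun st i =>
    (PySem.List.pyRange 0 n 1).foldl (fun st j =>
      (pvGStepA n grid st.1 i j, pvZStep n grid st.2 i j)) st)
    (pvGraph0 n, pvZero0 n)

-- ===== PORT B =====
-- stage 1 of Source B: house = [False]*size; if n > 0: house[v] = grid[(v-1)//n][(v-1)%n] == '1'
def pvHouseTbl (n : Int) (grid : List (List String)) : List Bool :=
  if n > 0 then
    (PySem.List.pyRange 1 (n * n + 1) 1).foldl (fun h v =>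
      PySem.List.pySetD h v
        (PySem.List.pyGetD (PySem.List.pyGetD grid (PySem.Int.floordiv (v - 1) n) [])
          (PySem.Int.mod (v - 1) n) "" == "1"))
      (List.replicate (n * n + 1).toNat false)
  else List.replicate (n * n + 1).toNat false

-- per-node body of stage 2: decode (i,j) = divmod(v-1, n), look only at the table
def pvNbrs (n : Int) (house : List Bool) (v : Int) : List Int :=
  if v > 0 ∧ PySem.List.pyGetD house v false = true then
    let i := PySem.Int.floordiv (v - 1) n
    let j := PySem.Int.mod (v - 1) n
    let l1 := if i > 0 ∧ PySem.List.pyGetD house (v - n) false = true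
      then ([] : List Int) ++ [v - n] else []
    let l2 := if j > 0 ∧ PySem.List.pyGetD house (v - 1) false = true
      then l1 ++ [v - 1] else l1
    let l3 := if i < n - 1 ∧ PySem.List.pyGetD house (v + n) false = true
      then l2 ++ [v + n] else l2
    if j < n - 1 ∧ PySem.List.pyGetD house (v + 1) false = true
      then l3 ++ [v + 1] else l3
  else []

def grid_to_graph_alt (n : Int) (grid : List (List String)) : List (List Int) × List Bool :=
  ((PySem.List.pyRange 0 (n * n + 1) 1).foldl
      (fun g v => g ++ [pvNbrs n (pvHouseTbl n grid) v]) [],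
   pvHouseTbl n grid)

-- ===== PRECONDITION & SPEC =====
-- Exactly the inputs on which Python A returns: when n > 0 it reads grid[i][j] for all
-- 0 ≤ i,j < n, so it raises IndexError unless grid has at least n rows whose first n all
-- have length ≥ n; for n ≤ 0 the loops do not run and A is total.
def Pre_grid_to_graph (n : Int) (grid : List (List String)) : Prop :=
  0 < n → (n.toNat ≤ grid.length ∧ ∀ r ∈ grid.take n.toNat, n.toNat ≤ r.length)
instance (n : Int) (grid : List (List String)) : Decidable (Pre_grid_to_graph n grid) := by
  unfold Pre_grid_to_graph; infer_instance

def pvWitness_grid_to_graph : Int × List (List String) :=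
  (2, [["1", "0"], ["1", "1"]])

def Spec_grid_to_graph (n : Int) (grid : List (List String))
    (out : List (List Int) × List Bool) : Prop := out = grid_to_graph_alt n grid
instance (n : Int) (grid : List (List String)) (out : List (List Int) × List Bool) :
    Decidable (Spec_grid_to_graph n grid out) := by unfold Spec_grid_to_graph; infer_instance

-- ===== CLAIM (what is proved, stated in full; the proofs are below) =====
def Claim_equal_grid_to_graph : Prop := ∀ (n : Int) (grid : List (List String)),
  Dom_grid_to_graph n grid → Pre_grid_to_graph n grid →
  Spec_grid_to_graph n grid (grid_to_graph n grid)

-- ===== LEMMAS AND PROOFS =====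

-- Nat-indexed cell test and the closed form of A's adjacency lists after the first k cells
-- (row-major) have been processed: node x = a*N+b+1 holds, in this order, its up, left,
-- down and right neighbour, each guarded by "that edge has already been emitted".
def hsN (grid : List (List String)) (a b : Nat) : Bool := pvHouse grid (a : Int) (b : Int)

def gf (grid : List (List String)) (N k x : Nat) : List Int :=
  if x = 0 then []
  else
    let a := (x - 1) / N
    let b := (x - 1) % N
    if hsN grid a b then
      (if a ≠ 0 ∧ hsN grid (a - 1) b = true ∧ (a - 1) * N + b < k then
        [(((a - 1) * N + b + 1 : Nat) : Int)] else [])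
      ++ (if b ≠ 0 ∧ hsN grid a (b - 1) = true ∧ a * N + (b - 1) < k then
        [((a * N + b : Nat) : Int)] else [])
      ++ (if a + 1 < N ∧ hsN grid (a + 1) b = true ∧ a * N + b < k then
        [(((a + 1) * N + b + 1 : Nat) : Int)] else [])
      ++ (if b + 1 < N ∧ hsN grid a (b + 1) = true ∧ a * N + b < k then
        [((a * N + b + 2 : Nat) : Int)] else [])
    else []

def EA (grid : List (List String)) (N k : Nat) : List (List Int) :=
  (List.range (N * N + 1)).map (gf grid N k)

-- closed form of the boolean table after the first k cells have been recorded
def zf (grid : List (List String)) (N k x : Nat) : Bool :=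
  decide (x ≠ 0 ∧ x - 1 < k) && hsN grid ((x - 1) / N) ((x - 1) % N)

def EZ (grid : List (List String)) (N k : Nat) : List Bool :=
  (List.range (N * N + 1)).map (zf grid N k)

lemma dec_div {N a b : Nat} (hb : b < N) : (a * N + b) / N = a := by
  rw [Nat.mul_comm, Nat.mul_add_div (by omega), Nat.div_eq_of_lt hb, Nat.add_zero]

lemma dec_mod {N a b : Nat} (hb : b < N) : (a * N + b) % N = b := by
  rw [Nat.mul_comm, Nat.mul_add_mod, Nat.mod_eq_of_lt hb]

lemma lin_inj {N a b c d : Nat} (hb : b < N) (hd : d < N) (h : a * N + b = c * N + d) :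
    a = c ∧ b = d := by
  constructor
  · have h2 := congrArg (· / N) h
    simpa [dec_div hb, dec_div hd] using h2
  · have h2 := congrArg (· % N) h
    simpa [dec_mod hb, dec_mod hd] using h2

lemma gf_zero (grid : List (List String)) (N x : Nat) : gf grid N 0 x = [] := by
  unfold gf; split_ifs <;> simp

lemma gf_x0 (grid : List (List String)) (N k : Nat) : gf grid N k 0 = [] := by
  unfold gf; simp

lemma gf_pos (grid : List (List String)) (N k a b : Nat) (hb : b < N) :
    gf grid N k (a * N + b + 1) =
      if hsN grid a b then
        (if a ≠ 0 ∧ hsN grid (a - 1) b = true ∧ (a - 1) * N + b < k then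
          [(((a - 1) * N + b + 1 : Nat) : Int)] else [])
        ++ (if b ≠ 0 ∧ hsN grid a (b - 1) = true ∧ a * N + (b - 1) < k then
          [((a * N + b : Nat) : Int)] else [])
        ++ (if a + 1 < N ∧ hsN grid (a + 1) b = true ∧ a * N + b < k then
          [(((a + 1) * N + b + 1 : Nat) : Int)] else [])
        ++ (if b + 1 < N ∧ hsN grid a (b + 1) = true ∧ a * N + b < k then
          [((a * N + b + 2 : Nat) : Int)] else [])
      else [] := by
  unfold gf
  simp [dec_div hb, dec_mod hb]

lemma pred_mul {i N : Nat} (h : i ≠ 0) : (i - 1) * N + N = i * N := by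
  obtain ⟨i', rfl⟩ : ∃ i', i = i' + 1 := ⟨i - 1, by omega⟩
  simp [Nat.add_one_mul]

-- one processing step advances the closed form: the only entries that change are the two
-- endpoints of the down edge and the two endpoints of the right edge emitted at cell (i,j)
lemma gf_succ (grid : List (List String)) {N i j : Nat} (hi : i < N) (hj : j < N)
    {x : Nat} (hx : x < N * N + 1) :
    gf grid N (i * N + j + 1) x =
      gf grid N (i * N + j) x
      ++ (if x = i * N + j + 1 ∧ hsN grid i j = true ∧ i + 1 < N ∧ hsN grid (i + 1) j = true
          then [(((i + 1) * N + j + 1 : Nat) : Int)] else [])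
      ++ (if x = (i + 1) * N + j + 1 ∧ hsN grid i j = true ∧ i + 1 < N ∧ hsN grid (i + 1) j = true
          then [((i * N + j + 1 : Nat) : Int)] else [])
      ++ (if x = i * N + j + 1 ∧ hsN grid i j = true ∧ j + 1 < N ∧ hsN grid i (j + 1) = true
          then [((i * N + j + 2 : Nat) : Int)] else [])
      ++ (if x = i * N + j + 2 ∧ hsN grid i j = true ∧ j + 1 < N ∧ hsN grid i (j + 1) = true
          then [((i * N + j + 1 : Nat) : Int)] else []) := by
  have hN : 0 < N := by omega
  have hmNi : (i + 1) * N = i * N + N := by rw [Nat.add_one_mul]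
  by_cases hx0 : x = 0
  · subst hx0
    rw [gf_x0, gf_x0,
      if_neg (show ¬ (0 = i * N + j + 1 ∧ hsN grid i j = true ∧ i + 1 < N ∧
        hsN grid (i + 1) j = true) from fun hcon => absurd hcon.1 (by omega)),
      if_neg (show ¬ (0 = (i + 1) * N + j + 1 ∧ hsN grid i j = true ∧ i + 1 < N ∧
        hsN grid (i + 1) j = true) from fun hcon => absurd hcon.1 (by omega)),
      if_neg (show ¬ (0 = i * N + j + 1 ∧ hsN grid i j = true ∧ j + 1 < N ∧
        hsN grid i (j + 1) = true) from fun hcon => absurd hcon.1 (by omega)),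
      if_neg (show ¬ (0 = i * N + j + 2 ∧ hsN grid i j = true ∧ j + 1 < N ∧
        hsN grid i (j + 1) = true) from fun hcon => absurd hcon.1 (by omega))]
    simp
  · obtain ⟨a, b, hb, hxab⟩ : ∃ a b, b < N ∧ x = a * N + b + 1 := by
      refine ⟨(x - 1) / N, (x - 1) % N, Nat.mod_lt _ hN, ?_⟩
      have h := Nat.div_add_mod (x - 1) N
      rw [Nat.mul_comm] at h
      omega
    have ha : a < N := by
      by_contra hcon
      have h2 : N * N ≤ a * N := Nat.mul_le_mul_right N (by omega)
      omega
    subst hxab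
    have hmNa : (a + 1) * N = a * N + N := by rw [Nat.add_one_mul]
    by_cases hac : a = i ∧ b = j
    · obtain ⟨rfl, rfl⟩ := hac
      rw [gf_pos grid N _ a b hb, gf_pos grid N _ a b hb,
        if_neg (show ¬ (a * N + b + 1 = (a + 1) * N + b + 1 ∧ hsN grid a b = true ∧
          a + 1 < N ∧ hsN grid (a + 1) b = true) from fun hcon => absurd hcon.1 (by omega)),
        if_neg (show ¬ (a * N + b + 1 = a * N + b + 2 ∧ hsN grid a b = true ∧
          b + 1 < N ∧ hsN grid a (b + 1) = true) from fun hcon => absurd hcon.1 (by omega))]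
      by_cases hg : hsN grid a b = true
      · rw [if_pos hg]
        have i1 : (a ≠ 0 ∧ hsN grid (a - 1) b = true ∧ (a - 1) * N + b < a * N + b + 1) ↔
            (a ≠ 0 ∧ hsN grid (a - 1) b = true ∧ (a - 1) * N + b < a * N + b) := by
          constructor <;> rintro ⟨u, v, w⟩ <;>
            exact ⟨u, v, by have := pred_mul (N := N) u; omega⟩
        have i2 : (b ≠ 0 ∧ hsN grid a (b - 1) = true ∧ a * N + (b - 1) < a * N + b + 1) ↔
            (b ≠ 0 ∧ hsN grid a (b - 1) = true ∧ a * N + (b - 1) < a * N + b) := by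
          constructor <;> rintro ⟨u, v, w⟩ <;> exact ⟨u, v, by omega⟩
        have i3 : (a + 1 < N ∧ hsN grid (a + 1) b = true ∧ a * N + b < a * N + b + 1) ↔
            (a + 1 < N ∧ hsN grid (a + 1) b = true) := by
          constructor
          · rintro ⟨u, v, _⟩; exact ⟨u, v⟩
          · rintro ⟨u, v⟩; exact ⟨u, v, by omega⟩
        have i4 : (b + 1 < N ∧ hsN grid a (b + 1) = true ∧ a * N + b < a * N + b + 1) ↔
            (b + 1 < N ∧ hsN grid a (b + 1) = true) := by
          constructor
          · rintro ⟨u, v, _⟩; exact ⟨u, v⟩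
          · rintro ⟨u, v⟩; exact ⟨u, v, by omega⟩
        have e1 : (a * N + b + 1 = a * N + b + 1 ∧ hsN grid a b = true ∧ a + 1 < N ∧
            hsN grid (a + 1) b = true) ↔ (a + 1 < N ∧ hsN grid (a + 1) b = true) := by
          constructor
          · rintro ⟨_, _, u, v⟩; exact ⟨u, v⟩
          · rintro ⟨u, v⟩; exact ⟨rfl, hg, u, v⟩
        have e3 : (a * N + b + 1 = a * N + b + 1 ∧ hsN grid a b = true ∧ b + 1 < N ∧
            hsN grid a (b + 1) = true) ↔ (b + 1 < N ∧ hsN grid a (b + 1) = true) := by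
          constructor
          · rintro ⟨_, _, u, v⟩; exact ⟨u, v⟩
          · rintro ⟨u, v⟩; exact ⟨rfl, hg, u, v⟩
        rw [if_congr i1 rfl rfl, if_congr i2 rfl rfl, if_congr i3 rfl rfl, if_congr i4 rfl rfl,
          if_congr e1 rfl rfl, if_congr e3 rfl rfl,
          if_neg (show ¬ (a + 1 < N ∧ hsN grid (a + 1) b = true ∧ a * N + b < a * N + b) from
            fun hcon => absurd hcon.2.2 (by omega)),
          if_neg (show ¬ (b + 1 < N ∧ hsN grid a (b + 1) = true ∧ a * N + b < a * N + b) from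
            fun hcon => absurd hcon.2.2 (by omega))]
        simp [hg, List.append_assoc]
      · rw [if_neg hg,
          if_neg (show ¬ (a * N + b + 1 = a * N + b + 1 ∧ hsN grid a b = true ∧ a + 1 < N ∧
            hsN grid (a + 1) b = true) from fun hcon => hg hcon.2.1),
          if_neg (show ¬ (a * N + b + 1 = a * N + b + 1 ∧ hsN grid a b = true ∧ b + 1 < N ∧
            hsN grid a (b + 1) = true) from fun hcon => hg hcon.2.1)]
        simp [hg]
    · by_cases had : a = i + 1 ∧ b = j
      · obtain ⟨rfl, rfl⟩ := had
        rw [gf_pos grid N _ (i + 1) b hb, gf_pos grid N _ (i + 1) b hb,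
          if_neg (show ¬ ((i + 1) * N + b + 1 = i * N + b + 1 ∧ hsN grid i b = true ∧
            i + 1 < N ∧ hsN grid (i + 1) b = true) from fun hcon => absurd hcon.1 (by omega)),
          if_neg (show ¬ ((i + 1) * N + b + 1 = i * N + b + 2 ∧ hsN grid i b = true ∧
            b + 1 < N ∧ hsN grid i (b + 1) = true) from fun hcon => by
              have h1 := hcon.1
              have h2 := hcon.2.2.1
              omega)]
        by_cases hg : hsN grid (i + 1) b = true
        · rw [if_pos hg]
          have i1k : ¬ (i + 1 ≠ 0 ∧ hsN grid (i + 1 - 1) b = true ∧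
              (i + 1 - 1) * N + b < i * N + b) := by
            rintro ⟨_, _, w⟩
            simp only [Nat.add_sub_cancel] at w
            omega
          have i1s : (i + 1 ≠ 0 ∧ hsN grid (i + 1 - 1) b = true ∧
              (i + 1 - 1) * N + b < i * N + b + 1) ↔ (hsN grid i b = true) := by
            simp only [Nat.add_sub_cancel]
            constructor
            · rintro ⟨_, v, _⟩; exact v
            · intro v; exact ⟨by omega, v, by omega⟩
          rw [if_congr i1s rfl rfl, if_neg i1k,
            if_neg (show ¬ (b ≠ 0 ∧ hsN grid (i + 1) (b - 1) = true ∧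
              (i + 1) * N + (b - 1) < i * N + b) from fun hcon => by
                have := hcon.1; have := hcon.2.2; omega),
            if_neg (show ¬ (b ≠ 0 ∧ hsN grid (i + 1) (b - 1) = true ∧
              (i + 1) * N + (b - 1) < i * N + b + 1) from fun hcon => by
                have := hcon.1; have := hcon.2.2; omega),
            if_neg (show ¬ (i + 1 + 1 < N ∧ hsN grid (i + 1 + 1) b = true ∧
              (i + 1) * N + b < i * N + b) from fun hcon => by have := hcon.2.2; omega),
            if_neg (show ¬ (i + 1 + 1 < N ∧ hsN grid (i + 1 + 1) b = true ∧
              (i + 1) * N + b < i * N + b + 1) from fun hcon => by have := hcon.2.2; omega),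
            if_neg (show ¬ (b + 1 < N ∧ hsN grid (i + 1) (b + 1) = true ∧
              (i + 1) * N + b < i * N + b) from fun hcon => by have := hcon.2.2; omega),
            if_neg (show ¬ (b + 1 < N ∧ hsN grid (i + 1) (b + 1) = true ∧
              (i + 1) * N + b < i * N + b + 1) from fun hcon => by have := hcon.2.2; omega),
            if_congr (show ((i + 1) * N + b + 1 = (i + 1) * N + b + 1 ∧ hsN grid i b = true ∧
              i + 1 < N ∧ hsN grid (i + 1) b = true) ↔ (hsN grid i b = true) from by
                constructor
                · rintro ⟨_, v, _, _⟩; exact v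
                · intro v; exact ⟨rfl, v, ha, hg⟩) rfl rfl]
          simp [hg]
          exact fun h1 _ _ => absurd h1 (by omega)
        · rw [if_neg hg,
            if_neg (show ¬ ((i + 1) * N + b + 1 = (i + 1) * N + b + 1 ∧ hsN grid i b = true ∧
              i + 1 < N ∧ hsN grid (i + 1) b = true) from fun hcon => hg hcon.2.2.2)]
          simp [hg]
          exact fun h1 _ _ => absurd h1 (by omega)
      · by_cases hae : a = i ∧ b = j + 1
        · obtain ⟨rfl, rfl⟩ := hae
          rw [gf_pos grid N _ a (j + 1) hb, gf_pos grid N _ a (j + 1) hb,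
            if_neg (show ¬ (a * N + (j + 1) + 1 = a * N + j + 1 ∧ hsN grid a j = true ∧
              a + 1 < N ∧ hsN grid (a + 1) j = true) from fun hcon => absurd hcon.1 (by omega)),
            if_neg (show ¬ (a * N + (j + 1) + 1 = (a + 1) * N + j + 1 ∧ hsN grid a j = true ∧
              a + 1 < N ∧ hsN grid (a + 1) j = true) from fun hcon => by
                have h1 := hcon.1; omega),
            if_neg (show ¬ (a * N + (j + 1) + 1 = a * N + j + 1 ∧ hsN grid a j = true ∧
              j + 1 < N ∧ hsN grid a (j + 1) = true) from fun hcon => absurd hcon.1 (by omega))]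
          by_cases hg : hsN grid a (j + 1) = true
          · rw [if_pos hg]
            have i1 : (a ≠ 0 ∧ hsN grid (a - 1) (j + 1) = true ∧
                (a - 1) * N + (j + 1) < a * N + j + 1) ↔
                (a ≠ 0 ∧ hsN grid (a - 1) (j + 1) = true ∧
                (a - 1) * N + (j + 1) < a * N + j) := by
              constructor <;> rintro ⟨u, v, w⟩ <;>
                exact ⟨u, v, by have := pred_mul (N := N) u; omega⟩
            have i2s : (j + 1 ≠ 0 ∧ hsN grid a (j + 1 - 1) = true ∧
                a * N + (j + 1 - 1) < a * N + j + 1) ↔ (hsN grid a j = true) := by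
              simp only [Nat.add_sub_cancel]
              constructor
              · rintro ⟨_, v, _⟩; exact v
              · intro v; exact ⟨by omega, v, by omega⟩
            have i2k : ¬ (j + 1 ≠ 0 ∧ hsN grid a (j + 1 - 1) = true ∧
                a * N + (j + 1 - 1) < a * N + j) := by
              rintro ⟨_, _, w⟩
              simp only [Nat.add_sub_cancel] at w
              omega
            rw [if_congr i1 rfl rfl, if_congr i2s rfl rfl, if_neg i2k,
              if_neg (show ¬ (a + 1 < N ∧ hsN grid (a + 1) (j + 1) = true ∧
                a * N + (j + 1) < a * N + j) from fun hcon => by have := hcon.2.2; omega),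
              if_neg (show ¬ (a + 1 < N ∧ hsN grid (a + 1) (j + 1) = true ∧
                a * N + (j + 1) < a * N + j + 1) from fun hcon => by have := hcon.2.2; omega),
              if_neg (show ¬ (j + 1 + 1 < N ∧ hsN grid a (j + 1 + 1) = true ∧
                a * N + (j + 1) < a * N + j) from fun hcon => by have := hcon.2.2; omega),
              if_neg (show ¬ (j + 1 + 1 < N ∧ hsN grid a (j + 1 + 1) = true ∧
                a * N + (j + 1) < a * N + j + 1) from fun hcon => by have := hcon.2.2; omega),
              if_congr (show (a * N + (j + 1) + 1 = a * N + j + 2 ∧ hsN grid a j = true ∧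
                j + 1 < N ∧ hsN grid a (j + 1) = true) ↔ (hsN grid a j = true) from by
                  constructor
                  · rintro ⟨_, v, _, _⟩; exact v
                  · intro v; exact ⟨by omega, v, hb, hg⟩) rfl rfl]
            by_cases hg2 : hsN grid a j = true <;> simp [hg, hg2, Nat.add_assoc]
          · rw [if_neg hg,
              if_neg (show ¬ (a * N + (j + 1) + 1 = a * N + j + 2 ∧ hsN grid a j = true ∧
                j + 1 < N ∧ hsN grid a (j + 1) = true) from fun hcon => hg hcon.2.2.2)]
            simp [hg]
        · -- generic entry: none of the four conditions can fire
          rw [gf_pos grid N _ a b hb, gf_pos grid N _ a b hb,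
            if_neg (show ¬ (a * N + b + 1 = i * N + j + 1 ∧ hsN grid i j = true ∧ i + 1 < N ∧
              hsN grid (i + 1) j = true) from fun hcon => by
                obtain ⟨u, v⟩ := lin_inj hb hj (show a * N + b = i * N + j by omega)
                exact hac ⟨u, v⟩),
            if_neg (show ¬ (a * N + b + 1 = (i + 1) * N + j + 1 ∧ hsN grid i j = true ∧
              i + 1 < N ∧ hsN grid (i + 1) j = true) from fun hcon => by
                obtain ⟨u, v⟩ := lin_inj hb hj (show a * N + b = (i + 1) * N + j by omega)
                exact had ⟨u, v⟩),
            if_neg (show ¬ (a * N + b + 1 = i * N + j + 1 ∧ hsN grid i j = true ∧ j + 1 < N ∧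
              hsN grid i (j + 1) = true) from fun hcon => by
                obtain ⟨u, v⟩ := lin_inj hb hj (show a * N + b = i * N + j by omega)
                exact hac ⟨u, v⟩),
            if_neg (show ¬ (a * N + b + 1 = i * N + j + 2 ∧ hsN grid i j = true ∧ j + 1 < N ∧
              hsN grid i (j + 1) = true) from fun hcon => by
                have hj1 : j + 1 < N := hcon.2.2.1
                obtain ⟨u, v⟩ := lin_inj hb hj1 (show a * N + b = i * N + (j + 1) by omega)
                exact hae ⟨u, v⟩)]
          have i1 : (a ≠ 0 ∧ hsN grid (a - 1) b = true ∧ (a - 1) * N + b < i * N + j + 1) ↔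
              (a ≠ 0 ∧ hsN grid (a - 1) b = true ∧ (a - 1) * N + b < i * N + j) := by
            constructor <;> rintro ⟨u, v, w⟩ <;> refine ⟨u, v, ?_⟩
            · rcases Nat.lt_or_ge ((a - 1) * N + b) (i * N + j) with q | q
              · exact q
              · exfalso
                obtain ⟨p, q⟩ := lin_inj hb hj (show (a - 1) * N + b = i * N + j by omega)
                exact had ⟨by omega, q⟩
            · omega
          have i2 : (b ≠ 0 ∧ hsN grid a (b - 1) = true ∧ a * N + (b - 1) < i * N + j + 1) ↔
              (b ≠ 0 ∧ hsN grid a (b - 1) = true ∧ a * N + (b - 1) < i * N + j) := by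
            constructor <;> rintro ⟨u, v, w⟩ <;> refine ⟨u, v, ?_⟩
            · rcases Nat.lt_or_ge (a * N + (b - 1)) (i * N + j) with q | q
              · exact q
              · exfalso
                obtain ⟨p, q⟩ := lin_inj (show b - 1 < N by omega) hj
                  (show a * N + (b - 1) = i * N + j by omega)
                exact hae ⟨p, by omega⟩
            · omega
          have i3 : (a + 1 < N ∧ hsN grid (a + 1) b = true ∧ a * N + b < i * N + j + 1) ↔
              (a + 1 < N ∧ hsN grid (a + 1) b = true ∧ a * N + b < i * N + j) := by
            constructor <;> rintro ⟨u, v, w⟩ <;> refine ⟨u, v, ?_⟩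
            · rcases Nat.lt_or_ge (a * N + b) (i * N + j) with q | q
              · exact q
              · exfalso
                obtain ⟨p, q⟩ := lin_inj hb hj (show a * N + b = i * N + j by omega)
                exact hac ⟨p, q⟩
            · omega
          have i4 : (b + 1 < N ∧ hsN grid a (b + 1) = true ∧ a * N + b < i * N + j + 1) ↔
              (b + 1 < N ∧ hsN grid a (b + 1) = true ∧ a * N + b < i * N + j) := by
            constructor <;> rintro ⟨u, v, w⟩ <;> refine ⟨u, v, ?_⟩
            · rcases Nat.lt_or_ge (a * N + b) (i * N + j) with q | q
              · exact q
              · exfalso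
                obtain ⟨p, q⟩ := lin_inj hb hj (show a * N + b = i * N + j by omega)
                exact hac ⟨p, q⟩
            · omega
          rw [if_congr i1 rfl rfl, if_congr i2 rfl rfl, if_congr i3 rfl rfl,
            if_congr i4 rfl rfl]
          simp

-- the four possible effects of A's step on the graph
lemma shape_none (grid : List (List String)) {N i j : Nat} (hi : i < N) (hj : j < N)
    (hd : ¬ (i + 1 < N ∧ hsN grid i j = true ∧ hsN grid (i + 1) j = true))
    (he : ¬ (j + 1 < N ∧ hsN grid i j = true ∧ hsN grid i (j + 1) = true)) :
    EA grid N (i * N + j) = EA grid N (i * N + j + 1) := by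
  unfold EA
  refine List.map_congr_left (fun x hx => ?_)
  rw [List.mem_range] at hx
  rw [gf_succ grid hi hj hx,
    if_neg (show ¬ (x = i * N + j + 1 ∧ hsN grid i j = true ∧ i + 1 < N ∧
      hsN grid (i + 1) j = true) from fun hcon => hd ⟨hcon.2.2.1, hcon.2.1, hcon.2.2.2⟩),
    if_neg (show ¬ (x = (i + 1) * N + j + 1 ∧ hsN grid i j = true ∧ i + 1 < N ∧
      hsN grid (i + 1) j = true) from fun hcon => hd ⟨hcon.2.2.1, hcon.2.1, hcon.2.2.2⟩),
    if_neg (show ¬ (x = i * N + j + 1 ∧ hsN grid i j = true ∧ j + 1 < N ∧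
      hsN grid i (j + 1) = true) from fun hcon => he ⟨hcon.2.2.1, hcon.2.1, hcon.2.2.2⟩),
    if_neg (show ¬ (x = i * N + j + 2 ∧ hsN grid i j = true ∧ j + 1 < N ∧
      hsN grid i (j + 1) = true) from fun hcon => he ⟨hcon.2.2.1, hcon.2.1, hcon.2.2.2⟩)]
  simp

lemma shape_d (grid : List (List String)) {N i j : Nat} (hi : i < N) (hj : j < N)
    (hb1 : i + 1 < N) (h1 : hsN grid i j = true) (h2 : hsN grid (i + 1) j = true)
    (he : ¬ (j + 1 < N ∧ hsN grid i j = true ∧ hsN grid i (j + 1) = true)) :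
    (((EA grid N (i * N + j)).modify (i * N + j + 1)
        (fun l => l ++ [(((i + 1) * N + j + 1 : Nat) : Int)])).modify ((i + 1) * N + j + 1)
        (fun l => l ++ [((i * N + j + 1 : Nat) : Int)])) = EA grid N (i * N + j + 1) := by
  have hN : 0 < N := by omega
  have hmNi : (i + 1) * N = i * N + N := by rw [Nat.add_one_mul]
  refine List.ext_getElem (by simp [EA]) (fun x hx1 hx2 => ?_)
  have hx : x < N * N + 1 := by simpa [EA] using hx2
  simp only [List.getElem_modify, EA, List.getElem_map, List.getElem_range]
  rw [gf_succ grid hi hj hx]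
  by_cases hxc : i * N + j + 1 = x
  · subst hxc
    rw [if_neg (show ¬ ((i + 1) * N + j + 1 = i * N + j + 1) from by omega), if_pos rfl,
      if_pos (show (i * N + j + 1 = i * N + j + 1 ∧ hsN grid i j = true ∧ i + 1 < N ∧
        hsN grid (i + 1) j = true) from ⟨rfl, h1, hb1, h2⟩),
      if_neg (show ¬ (i * N + j + 1 = (i + 1) * N + j + 1 ∧ hsN grid i j = true ∧ i + 1 < N ∧
        hsN grid (i + 1) j = true) from fun hcon => absurd hcon.1 (by omega)),
      if_neg (show ¬ (i * N + j + 1 = i * N + j + 1 ∧ hsN grid i j = true ∧ j + 1 < N ∧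
        hsN grid i (j + 1) = true) from fun hcon => he ⟨hcon.2.2.1, hcon.2.1, hcon.2.2.2⟩),
      if_neg (show ¬ (i * N + j + 1 = i * N + j + 2 ∧ hsN grid i j = true ∧ j + 1 < N ∧
        hsN grid i (j + 1) = true) from fun hcon => absurd hcon.1 (by omega))]
    simp
  · by_cases hxd : (i + 1) * N + j + 1 = x
    · subst hxd
      rw [if_pos rfl, if_neg (show ¬ (i * N + j + 1 = (i + 1) * N + j + 1) from by omega),
        if_neg (show ¬ ((i + 1) * N + j + 1 = i * N + j + 1 ∧ hsN grid i j = true ∧ i + 1 < N ∧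
          hsN grid (i + 1) j = true) from fun hcon => absurd hcon.1 (by omega)),
        if_pos (show ((i + 1) * N + j + 1 = (i + 1) * N + j + 1 ∧ hsN grid i j = true ∧
          i + 1 < N ∧ hsN grid (i + 1) j = true) from ⟨rfl, h1, hb1, h2⟩),
        if_neg (show ¬ ((i + 1) * N + j + 1 = i * N + j + 1 ∧ hsN grid i j = true ∧ j + 1 < N ∧
          hsN grid i (j + 1) = true) from fun hcon => absurd hcon.1 (by omega)),
        if_neg (show ¬ ((i + 1) * N + j + 1 = i * N + j + 2 ∧ hsN grid i j = true ∧ j + 1 < N ∧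
          hsN grid i (j + 1) = true) from fun hcon => by
            have := hcon.1; have := hcon.2.2.1; omega)]
      simp
    · rw [if_neg hxd, if_neg hxc,
        if_neg (show ¬ (x = i * N + j + 1 ∧ hsN grid i j = true ∧ i + 1 < N ∧
          hsN grid (i + 1) j = true) from fun hcon => hxc hcon.1.symm),
        if_neg (show ¬ (x = (i + 1) * N + j + 1 ∧ hsN grid i j = true ∧ i + 1 < N ∧
          hsN grid (i + 1) j = true) from fun hcon => hxd hcon.1.symm),
        if_neg (show ¬ (x = i * N + j + 1 ∧ hsN grid i j = true ∧ j + 1 < N ∧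
          hsN grid i (j + 1) = true) from fun hcon => hxc hcon.1.symm),
        if_neg (show ¬ (x = i * N + j + 2 ∧ hsN grid i j = true ∧ j + 1 < N ∧
          hsN grid i (j + 1) = true) from fun hcon => he ⟨hcon.2.2.1, hcon.2.1, hcon.2.2.2⟩)]
      simp

lemma shape_e (grid : List (List String)) {N i j : Nat} (hi : i < N) (hj : j < N)
    (hb2 : j + 1 < N) (h1 : hsN grid i j = true) (h3 : hsN grid i (j + 1) = true)
    (hd : ¬ (i + 1 < N ∧ hsN grid i j = true ∧ hsN grid (i + 1) j = true)) :
    (((EA grid N (i * N + j)).modify (i * N + j + 1)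
        (fun l => l ++ [((i * N + j + 2 : Nat) : Int)])).modify (i * N + j + 2)
        (fun l => l ++ [((i * N + j + 1 : Nat) : Int)])) = EA grid N (i * N + j + 1) := by
  have hN : 0 < N := by omega
  refine List.ext_getElem (by simp [EA]) (fun x hx1 hx2 => ?_)
  have hx : x < N * N + 1 := by simpa [EA] using hx2
  simp only [List.getElem_modify, EA, List.getElem_map, List.getElem_range]
  rw [gf_succ grid hi hj hx]
  by_cases hxc : i * N + j + 1 = x
  · subst hxc
    rw [if_neg (show ¬ (i * N + j + 2 = i * N + j + 1) from by omega), if_pos rfl,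
      if_neg (show ¬ (i * N + j + 1 = i * N + j + 1 ∧ hsN grid i j = true ∧ i + 1 < N ∧
        hsN grid (i + 1) j = true) from fun hcon => hd ⟨hcon.2.2.1, hcon.2.1, hcon.2.2.2⟩),
      if_neg (show ¬ (i * N + j + 1 = (i + 1) * N + j + 1 ∧ hsN grid i j = true ∧ i + 1 < N ∧
        hsN grid (i + 1) j = true) from fun hcon => hd ⟨hcon.2.2.1, hcon.2.1, hcon.2.2.2⟩),
      if_pos (show (i * N + j + 1 = i * N + j + 1 ∧ hsN grid i j = true ∧ j + 1 < N ∧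
        hsN grid i (j + 1) = true) from ⟨rfl, h1, hb2, h3⟩),
      if_neg (show ¬ (i * N + j + 1 = i * N + j + 2 ∧ hsN grid i j = true ∧ j + 1 < N ∧
        hsN grid i (j + 1) = true) from fun hcon => absurd hcon.1 (by omega))]
    simp
  · by_cases hxe : i * N + j + 2 = x
    · subst hxe
      rw [if_pos rfl, if_neg (show ¬ (i * N + j + 1 = i * N + j + 2) from by omega),
        if_neg (show ¬ (i * N + j + 2 = i * N + j + 1 ∧ hsN grid i j = true ∧ i + 1 < N ∧
          hsN grid (i + 1) j = true) from fun hcon => hd ⟨hcon.2.2.1, hcon.2.1, hcon.2.2.2⟩),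
        if_neg (show ¬ (i * N + j + 2 = (i + 1) * N + j + 1 ∧ hsN grid i j = true ∧ i + 1 < N ∧
          hsN grid (i + 1) j = true) from fun hcon => hd ⟨hcon.2.2.1, hcon.2.1, hcon.2.2.2⟩),
        if_neg (show ¬ (i * N + j + 2 = i * N + j + 1 ∧ hsN grid i j = true ∧ j + 1 < N ∧
          hsN grid i (j + 1) = true) from fun hcon => absurd hcon.1 (by omega)),
        if_pos (show (i * N + j + 2 = i * N + j + 2 ∧ hsN grid i j = true ∧ j + 1 < N ∧
          hsN grid i (j + 1) = true) from ⟨rfl, h1, hb2, h3⟩)]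
      simp
    · rw [if_neg hxe, if_neg hxc,
        if_neg (show ¬ (x = i * N + j + 1 ∧ hsN grid i j = true ∧ i + 1 < N ∧
          hsN grid (i + 1) j = true) from fun hcon => hd ⟨hcon.2.2.1, hcon.2.1, hcon.2.2.2⟩),
        if_neg (show ¬ (x = (i + 1) * N + j + 1 ∧ hsN grid i j = true ∧ i + 1 < N ∧
          hsN grid (i + 1) j = true) from fun hcon => hd ⟨hcon.2.2.1, hcon.2.1, hcon.2.2.2⟩),
        if_neg (show ¬ (x = i * N + j + 1 ∧ hsN grid i j = true ∧ j + 1 < N ∧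
          hsN grid i (j + 1) = true) from fun hcon => hxc hcon.1.symm),
        if_neg (show ¬ (x = i * N + j + 2 ∧ hsN grid i j = true ∧ j + 1 < N ∧
          hsN grid i (j + 1) = true) from fun hcon => hxe hcon.1.symm)]
      simp

lemma shape_de (grid : List (List String)) {N i j : Nat} (hi : i < N) (hj : j < N)
    (hb1 : i + 1 < N) (hb2 : j + 1 < N) (h1 : hsN grid i j = true)
    (h2 : hsN grid (i + 1) j = true) (h3 : hsN grid i (j + 1) = true) :
    (((((EA grid N (i * N + j)).modify (i * N + j + 1)
        (fun l => l ++ [(((i + 1) * N + j + 1 : Nat) : Int)])).modify ((i + 1) * N + j + 1)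
        (fun l => l ++ [((i * N + j + 1 : Nat) : Int)])).modify (i * N + j + 1)
        (fun l => l ++ [((i * N + j + 2 : Nat) : Int)])).modify (i * N + j + 2)
        (fun l => l ++ [((i * N + j + 1 : Nat) : Int)])) = EA grid N (i * N + j + 1) := by
  have hN : 0 < N := by omega
  have hmNi : (i + 1) * N = i * N + N := by rw [Nat.add_one_mul]
  have hN2 : 2 ≤ N := by omega
  refine List.ext_getElem (by simp [EA]) (fun x hx1 hx2 => ?_)
  have hx : x < N * N + 1 := by simpa [EA] using hx2
  simp only [List.getElem_modify, EA, List.getElem_map, List.getElem_range]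
  rw [gf_succ grid hi hj hx]
  by_cases hxc : i * N + j + 1 = x
  · subst hxc
    rw [if_neg (show ¬ (i * N + j + 2 = i * N + j + 1) from by omega), if_pos rfl,
      if_neg (show ¬ ((i + 1) * N + j + 1 = i * N + j + 1) from by omega),
      if_pos (show (i * N + j + 1 = i * N + j + 1 ∧ hsN grid i j = true ∧ i + 1 < N ∧
        hsN grid (i + 1) j = true) from ⟨rfl, h1, hb1, h2⟩),
      if_neg (show ¬ (i * N + j + 1 = (i + 1) * N + j + 1 ∧ hsN grid i j = true ∧ i + 1 < N ∧
        hsN grid (i + 1) j = true) from fun hcon => absurd hcon.1 (by omega)),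
      if_pos (show (i * N + j + 1 = i * N + j + 1 ∧ hsN grid i j = true ∧ j + 1 < N ∧
        hsN grid i (j + 1) = true) from ⟨rfl, h1, hb2, h3⟩),
      if_neg (show ¬ (i * N + j + 1 = i * N + j + 2 ∧ hsN grid i j = true ∧ j + 1 < N ∧
        hsN grid i (j + 1) = true) from fun hcon => absurd hcon.1 (by omega))]
    simp
  · by_cases hxd : (i + 1) * N + j + 1 = x
    · subst hxd
      rw [if_neg (show ¬ (i * N + j + 2 = (i + 1) * N + j + 1) from by omega),
        if_neg (show ¬ (i * N + j + 1 = (i + 1) * N + j + 1) from by omega), if_pos rfl,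
        if_neg (show ¬ ((i + 1) * N + j + 1 = i * N + j + 1 ∧ hsN grid i j = true ∧ i + 1 < N ∧
          hsN grid (i + 1) j = true) from fun hcon => absurd hcon.1 (by omega)),
        if_pos (show ((i + 1) * N + j + 1 = (i + 1) * N + j + 1 ∧ hsN grid i j = true ∧
          i + 1 < N ∧ hsN grid (i + 1) j = true) from ⟨rfl, h1, hb1, h2⟩),
        if_neg (show ¬ ((i + 1) * N + j + 1 = i * N + j + 1 ∧ hsN grid i j = true ∧ j + 1 < N ∧
          hsN grid i (j + 1) = true) from fun hcon => absurd hcon.1 (by omega)),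
        if_neg (show ¬ ((i + 1) * N + j + 1 = i * N + j + 2 ∧ hsN grid i j = true ∧ j + 1 < N ∧
          hsN grid i (j + 1) = true) from fun hcon => absurd hcon.1 (by omega))]
      simp
      omega
    · by_cases hxe : i * N + j + 2 = x
      · subst hxe
        rw [if_pos rfl, if_neg (show ¬ (i * N + j + 1 = i * N + j + 2) from by omega),
          if_neg (show ¬ ((i + 1) * N + j + 1 = i * N + j + 2) from by omega),
          if_neg (show ¬ (i * N + j + 2 = i * N + j + 1 ∧ hsN grid i j = true ∧ i + 1 < N ∧
            hsN grid (i + 1) j = true) from fun hcon => absurd hcon.1 (by omega)),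
          if_neg (show ¬ (i * N + j + 2 = (i + 1) * N + j + 1 ∧ hsN grid i j = true ∧
            i + 1 < N ∧ hsN grid (i + 1) j = true) from fun hcon => absurd hcon.1 (by omega)),
          if_neg (show ¬ (i * N + j + 2 = i * N + j + 1 ∧ hsN grid i j = true ∧ j + 1 < N ∧
            hsN grid i (j + 1) = true) from fun hcon => absurd hcon.1 (by omega)),
          if_pos (show (i * N + j + 2 = i * N + j + 2 ∧ hsN grid i j = true ∧ j + 1 < N ∧
            hsN grid i (j + 1) = true) from ⟨rfl, h1, hb2, h3⟩)]
        simp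
      · rw [if_neg hxe, if_neg hxc, if_neg hxd,
          if_neg (show ¬ (x = i * N + j + 1 ∧ hsN grid i j = true ∧ i + 1 < N ∧
            hsN grid (i + 1) j = true) from fun hcon => hxc hcon.1.symm),
          if_neg (show ¬ (x = (i + 1) * N + j + 1 ∧ hsN grid i j = true ∧ i + 1 < N ∧
            hsN grid (i + 1) j = true) from fun hcon => hxd hcon.1.symm),
          if_neg (show ¬ (x = i * N + j + 1 ∧ hsN grid i j = true ∧ j + 1 < N ∧
            hsN grid i (j + 1) = true) from fun hcon => hxc hcon.1.symm),
          if_neg (show ¬ (x = i * N + j + 2 ∧ hsN grid i j = true ∧ j + 1 < N ∧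
            hsN grid i (j + 1) = true) from fun hcon => hxe hcon.1.symm)]
        simp
        exact hxc

-- the step lemma for A's graph component
lemma stepA_eq (grid : List (List String)) {N i j : Nat} (hi : i < N) (hj : j < N) :
    pvGStepA (N : Int) grid (EA grid N (i * N + j)) (i : Int) (j : Int) =
      EA grid N (i * N + j + 1) := by
  unfold pvGStepA pvAppendAt
  have e1 : ((i : Int) + 1) = ((i + 1 : Nat) : Int) := by omega
  have e2 : ((j : Int) + 1) = ((j + 1 : Nat) : Int) := by omega
  rw [e1, e2]
  have t1 : ((i : Int) * (N : Int) + (j : Int) + 1) = ((i * N + j + 1 : Nat) : Int) := by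
    push_cast; ring
  have t2 : (((i + 1 : Nat) : Int) * (N : Int) + (j : Int) + 1) =
      (((i + 1) * N + j + 1 : Nat) : Int) := by push_cast; ring
  have t3 : ((i : Int) * (N : Int) + (j : Int) + 2) = ((i * N + j + 2 : Nat) : Int) := by
    push_cast; ring
  rw [t1, t2, t3]
  simp only [Int.toNat_natCast, Bool.and_eq_true,
    show ((i : Int) ≠ (N : Int) - 1) ↔ i + 1 < N from by omega,
    show ((j : Int) ≠ (N : Int) - 1) ↔ j + 1 < N from by omega]
  split_ifs with hb2 hp2 hb1 hp1 hb1' hp1' hb1'' hp1''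
  · exact shape_de grid hi hj hb1 hb2 hp2.1 hp1.2 hp2.2
  · exact shape_e grid hi hj hb2 hp2.1 hp2.2 (fun hcon => hp1 ⟨hcon.2.1, hcon.2.2⟩)
  · exact shape_e grid hi hj hb2 hp2.1 hp2.2 (fun hcon => hb1 hcon.1)
  · exact shape_d grid hi hj hb1' hp1'.1 hp1'.2 (fun hcon => hp2 ⟨hcon.2.1, hcon.2.2⟩)
  · exact shape_none grid hi hj (fun hcon => hp1' ⟨hcon.2.1, hcon.2.2⟩)
      (fun hcon => hp2 ⟨hcon.2.1, hcon.2.2⟩)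
  · exact shape_none grid hi hj (fun hcon => hb1' hcon.1) (fun hcon => hp2 ⟨hcon.2.1, hcon.2.2⟩)
  · exact shape_d grid hi hj hb1'' hp1''.1 hp1''.2 (fun hcon => hb2 hcon.1)
  · exact shape_none grid hi hj (fun hcon => hp1'' ⟨hcon.2.1, hcon.2.2⟩)
      (fun hcon => hb2 hcon.1)
  · exact shape_none grid hi hj (fun hcon => hb1'' hcon.1) (fun hcon => hb2 hcon.1)

lemma hmul_aux {N a : Nat} (ha : a < N) : a * N + N ≤ N * N := by
  have h := Nat.mul_le_mul_right N (show a + 1 ≤ N by omega)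
  rwa [Nat.add_one_mul] at h

-- the step lemma for A's boolean-table component
lemma stepZ_eq (grid : List (List String)) {N i j : Nat} (hi : i < N) (hj : j < N) :
    pvZStep (N : Int) grid (EZ grid N (i * N + j)) (i : Int) (j : Int) =
      EZ grid N (i * N + j + 1) := by
  have hk : i * N + j < N * N := by have := hmul_aux hi; omega
  unfold pvZStep
  have t1 : ((i : Int) * (N : Int) + (j : Int) + 1) = ((i * N + j + 1 : Nat) : Int) := by
    push_cast; ring
  rw [t1, PySem.List.pySetD_natCast]
  have hh : pvHouse grid (i : Int) (j : Int) = hsN grid i j := rfl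
  by_cases hg : hsN grid i j = true
  · rw [if_pos (by rw [hh]; exact hg)]
    refine List.ext_getElem (by simp [EZ]) (fun x hx1 hx2 => ?_)
    have hx : x < N * N + 1 := by simpa [EZ] using hx2
    rw [List.getElem_set]
    simp only [EZ, List.getElem_map, List.getElem_range]
    by_cases hxc : i * N + j + 1 = x
    · rw [if_pos hxc]
      subst hxc
      unfold zf
      rw [decide_eq_true (show i * N + j + 1 ≠ 0 ∧ i * N + j + 1 - 1 < i * N + j + 1 by omega)]
      simp [dec_div hj, dec_mod hj, hg]
    · rw [if_neg hxc]
      unfold zf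
      congr 1
      exact decide_eq_decide.mpr (by constructor <;> rintro ⟨u, v⟩ <;> exact ⟨u, by omega⟩)
  · rw [if_neg (by rw [hh]; exact hg)]
    unfold EZ
    refine List.map_congr_left (fun x hx => ?_)
    rw [List.mem_range] at hx
    unfold zf
    by_cases hxc : x = i * N + j + 1
    · subst hxc
      simp [dec_div hj, dec_mod hj, hg]
    · congr 1
      exact decide_eq_decide.mpr (by constructor <;> rintro ⟨u, v⟩ <;> exact ⟨u, by omega⟩)

lemma EA_zero (grid : List (List String)) (N : Nat) : EA grid N 0 = pvGraph0 (N : Int) := by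
  unfold EA pvGraph0
  have h1 : ((N : Int) * N + 1) = ((N * N + 1 : Nat) : Int) := by push_cast; ring
  rw [h1, PySem.List.pyRange_zero_natCast, List.map_map]
  exact List.map_congr_left (fun x _ => gf_zero grid N x)

lemma EZ_zero (grid : List (List String)) (N : Nat) : EZ grid N 0 = pvZero0 (N : Int) := by
  unfold EZ pvZero0
  have h1 : (((N : Int) * N + 1)).toNat = N * N + 1 := by
    rw [show ((N : Int) * N + 1) = ((N * N + 1 : Nat) : Int) from by push_cast; ring]
    exact Int.toNat_natCast _
  rw [h1, List.eq_replicate_iff]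
  refine ⟨by simp, fun b hb => ?_⟩
  simp only [List.mem_map] at hb
  obtain ⟨x, _, rfl⟩ := hb
  unfold zf
  simp

-- accumulating a row and the whole double loop, for both components of A's state
lemma rowA (grid : List (List String)) {N i : Nat} (hi : i < N) :
    ∀ m, m ≤ N → (List.range m).foldl (fun g (j : Nat) => pvGStepA (N : Int) grid g (i : Int) (j : Int))
      (EA grid N (i * N)) = EA grid N (i * N + m) := by
  intro m
  induction m with
  | zero => intro _; simp
  | succ m ih =>
    intro hm
    rw [List.range_succ, List.foldl_append, ih (by omega)]
    simpa using stepA_eq grid hi (by omega : m < N)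

lemma allA (grid : List (List String)) {N : Nat} :
    ∀ m, m ≤ N → (List.range m).foldl (fun g (i : Nat) =>
        (List.range N).foldl (fun g (j : Nat) => pvGStepA (N : Int) grid g (i : Int) (j : Int)) g)
      (EA grid N 0) = EA grid N (m * N) := by
  intro m
  induction m with
  | zero => intro _; simp
  | succ m ih =>
    intro hm
    rw [List.range_succ, List.foldl_append, ih (by omega)]
    have h := rowA grid (show m < N by omega) N (le_refl N)
    simpa [Nat.add_one_mul] using h

lemma rowZ (grid : List (List String)) {N i : Nat} (hi : i < N) :
    ∀ m, m ≤ N → (List.range m).foldl (fun z (j : Nat) => pvZStep (N : Int) grid z (i : Int) (j : Int))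
      (EZ grid N (i * N)) = EZ grid N (i * N + m) := by
  intro m
  induction m with
  | zero => intro _; simp
  | succ m ih =>
    intro hm
    rw [List.range_succ, List.foldl_append, ih (by omega)]
    simpa using stepZ_eq grid hi (by omega : m < N)

lemma allZ (grid : List (List String)) {N : Nat} :
    ∀ m, m ≤ N → (List.range m).foldl (fun z (i : Nat) =>
        (List.range N).foldl (fun z (j : Nat) => pvZStep (N : Int) grid z (i : Int) (j : Int)) z)
      (EZ grid N 0) = EZ grid N (m * N) := by
  intro m
  induction m with
  | zero => intro _; simp
  | succ m ih =>
    intro hm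
    rw [List.range_succ, List.foldl_append, ih (by omega)]
    have h := rowZ grid (show m < N by omega) N (le_refl N)
    simpa [Nat.add_one_mul] using h

-- splitting A's pair-state fold into its two independent components
lemma A_split (n : Int) (grid : List (List String)) :
    grid_to_graph n grid =
      ((PySem.List.pyRange 0 n 1).foldl (fun g i =>
          (PySem.List.pyRange 0 n 1).foldl (fun g j => pvGStepA n grid g i j) g) (pvGraph0 n),
       (PySem.List.pyRange 0 n 1).foldl (fun z i =>
          (PySem.List.pyRange 0 n 1).foldl (fun z j => pvZStep n grid z i j) z) (pvZero0 n)) := by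
  unfold grid_to_graph
  have h2 : (fun (st : List (List Int) × List Bool) (i : Int) =>
      List.foldl (fun st j => (pvGStepA n grid st.1 i j, pvZStep n grid st.2 i j)) st
        (PySem.List.pyRange 0 n 1))
      = fun st i =>
        (List.foldl (fun g j => pvGStepA n grid g i j) st.1 (PySem.List.pyRange 0 n 1),
         List.foldl (fun z j => pvZStep n grid z i j) st.2 (PySem.List.pyRange 0 n 1)) := by
    funext st i
    cases st
    exact PySem.List.foldl_prod_mk (fun g j => pvGStepA n grid g i j)
      (fun z j => pvZStep n grid z i j) _ _ _
  rw [h2]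
  exact PySem.List.foldl_prod_mk
    (fun g i => List.foldl (fun g j => pvGStepA n grid g i j) g (PySem.List.pyRange 0 n 1))
    (fun z i => List.foldl (fun z j => pvZStep n grid z i j) z (PySem.List.pyRange 0 n 1)) _ _ _

-- pyGetD of the all-false table is false at every index
lemma pyGetD_replicate_false (k : Nat) (i : Int) :
    PySem.List.pyGetD (List.replicate k false) i false = false := by
  by_cases h : PySem.Raise.InRange (List.replicate k false).length i
  · have := PySem.List.pyGetD_mem (xs := List.replicate k false) (d := false) (i := i) h
    exact List.eq_of_mem_replicate this
  · exact PySem.List.pyGetD_of_none _ _ _ ((PySem.List.pyGet?_eq_none_iff _ _).mpr h)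

-- pyGetD of EZ at a Nat index in range is zf
lemma pyGetD_EZ (grid : List (List String)) (N k x : Nat) (hx : x < N * N + 1) :
    PySem.List.pyGetD (EZ grid N k) (x : Int) false = zf grid N k x := by
  rw [PySem.List.pyGetD_natCast]
  unfold EZ
  rw [List.getD_eq_getElem?_getD, List.getElem?_map, List.getElem?_range hx]
  rfl

lemma EZ_zero_rep (grid : List (List String)) (N : Nat) :
    EZ grid N 0 = List.replicate (N * N + 1) false := by
  unfold EZ
  have h : ∀ x ∈ List.range (N * N + 1), zf grid N 0 x = (fun _ => false) x := by
    intro x _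
    unfold zf
    simp
  rw [List.map_congr_left h, List.map_const', List.length_range]

-- zf at the full count is just the cell test
lemma zf_full (grid : List (List String)) {N a b : Nat} (ha : a < N) (hb : b < N) :
    zf grid N (N * N) (a * N + b + 1) = hsN grid a b := by
  have hk : a * N + b < N * N := by have := hmul_aux ha; omega
  unfold zf
  rw [decide_eq_true (show a * N + b + 1 ≠ 0 ∧ a * N + b + 1 - 1 < N * N by omega)]
  simp [dec_div hb, dec_mod hb]

-- recording cell m advances the table's closed form
lemma setEZ (grid : List (List String)) {N m : Nat} (_hm : m < N * N) :
    (EZ grid N m).set (m + 1) (hsN grid (m / N) (m % N)) = EZ grid N (m + 1) := by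
  refine List.ext_getElem (by simp [EZ]) (fun x hx1 hx2 => ?_)
  rw [List.getElem_set]
  simp only [EZ, List.getElem_map, List.getElem_range]
  by_cases hxc : m + 1 = x
  · rw [if_pos hxc]
    subst hxc
    unfold zf
    rw [decide_eq_true (show m + 1 ≠ 0 ∧ m + 1 - 1 < m + 1 by omega)]
    simp
  · rw [if_neg hxc]
    unfold zf
    congr 1
    exact decide_eq_decide.mpr (by constructor <;> rintro ⟨u, v⟩ <;> exact ⟨u, by omega⟩)

-- B's stage-1 fold computes the table's closed form, cell by cell
lemma houseB_partial (grid : List (List String)) (N : Nat) :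
    ∀ m, m ≤ N * N →
      (PySem.List.pyRange 1 ((m : Int) + 1) 1).foldl (fun h v =>
        PySem.List.pySetD h v
          (PySem.List.pyGetD (PySem.List.pyGetD grid (PySem.Int.floordiv (v - 1) (N : Int)) [])
            (PySem.Int.mod (v - 1) (N : Int)) "" == "1"))
        (List.replicate (N * N + 1) false) = EZ grid N m := by
  intro m
  induction m with
  | zero =>
    intro _
    rw [show ((0 : Nat) : Int) + 1 = 1 from by norm_num,
      PySem.List.pyRange_one_eq_nil (by omega), List.foldl_nil, EZ_zero_rep]
  | succ m ih =>
    intro hm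
    rw [show (((m + 1 : Nat)) : Int) + 1 = ((m : Int) + 1) + 1 from by push_cast; ring,
      PySem.List.pyRange_one_succ_right (by omega : (1 : Int) ≤ (m : Int) + 1),
      List.foldl_append, ih (by omega), List.foldl_cons, List.foldl_nil]
    have hv1 : ((m : Int) + 1) - 1 = ((m : Nat) : Int) := by omega
    rw [hv1, PySem.Int.floordiv_natCast, PySem.Int.mod_natCast,
      show ((m : Int) + 1) = ((m + 1 : Nat) : Int) from by push_cast; ring,
      PySem.List.pySetD_natCast]
    exact setEZ grid (by omega)

-- pvHouseTbl at positive n is the full table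
lemma houseTbl_eq (grid : List (List String)) (N : Nat) (hN : 0 < N) :
    pvHouseTbl (N : Int) grid = EZ grid N (N * N) := by
  unfold pvHouseTbl
  rw [if_pos (by exact_mod_cast hN)]
  have h1 : ((N : Int) * N + 1) = ((N * N : Nat) : Int) + 1 := by push_cast; ring
  have h2 : ((N : Int) * N + 1).toNat = N * N + 1 := by
    rw [show ((N : Int) * N + 1) = ((N * N + 1 : Nat) : Int) from by push_cast; ring]
    exact Int.toNat_natCast _
  rw [h2, h1]
  exact houseB_partial grid N (N * N) (le_refl _)

-- pvNbrs from the full table is A's closed-form adjacency list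
lemma nbrs_eq (grid : List (List String)) (N : Nat) (hN : 0 < N) (x : Nat)
    (hx : x < N * N + 1) :
    pvNbrs (N : Int) (EZ grid N (N * N)) (x : Int) = gf grid N (N * N) x := by
  by_cases hx0 : x = 0
  · subst hx0
    unfold pvNbrs
    rw [if_neg (fun hcon => by exact absurd hcon.1 (by norm_num)), gf_x0]
  · obtain ⟨a, b, hb, hxab⟩ : ∃ a b, b < N ∧ x = a * N + b + 1 := by
      refine ⟨(x - 1) / N, (x - 1) % N, Nat.mod_lt _ hN, ?_⟩
      have h := Nat.div_add_mod (x - 1) N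
      rw [Nat.mul_comm] at h
      omega
    have ha : a < N := by
      by_contra hcon
      have h2 : N * N ≤ a * N := Nat.mul_le_mul_right N (by omega)
      omega
    subst hxab
    have hself : PySem.List.pyGetD (EZ grid N (N * N)) ((a * N + b + 1 : Nat) : Int) false
        = hsN grid a b := by rw [pyGetD_EZ grid N _ _ hx, zf_full grid ha hb]
    have hij1 : (((a * N + b + 1 : Nat) : Int)) - 1 = ((a * N + b : Nat) : Int) := by
      push_cast; ring
    have hdiv : PySem.Int.floordiv ((a * N + b : Nat) : Int) (N : Int) = (a : Int) := by
      rw [PySem.Int.floordiv_natCast, dec_div hb]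
    have hmod : PySem.Int.mod ((a * N + b : Nat) : Int) (N : Int) = (b : Int) := by
      rw [PySem.Int.mod_natCast, dec_mod hb]
    unfold pvNbrs
    simp only [hij1, hdiv, hmod, hself]
    by_cases hg : hsN grid a b = true
    · rw [if_pos ⟨by positivity, hg⟩, gf_pos grid N _ a b hb, if_pos hg]
      -- up neighbour
      have hup : (if (a : Int) > 0 ∧
            PySem.List.pyGetD (EZ grid N (N * N)) (((a * N + b + 1 : Nat) : Int) - (N : Int)) false = true
          then ([] : List Int) ++ [((a * N + b + 1 : Nat) : Int) - (N : Int)] else []) =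
          (if a ≠ 0 ∧ hsN grid (a - 1) b = true ∧ (a - 1) * N + b < N * N then
            [(((a - 1) * N + b + 1 : Nat) : Int)] else []) := by
        by_cases h0 : a = 0
        · subst h0
          rw [if_neg (fun hcon => by exact absurd hcon.1 (by norm_num)),
            if_neg (fun hcon => hcon.1 rfl)]
        · have hxm : ((a * N + b + 1 : Nat) : Int) - (N : Int)
              = (((a - 1) * N + b + 1 : Nat) : Int) := by
            have h1 : ((a - 1 : Nat) : Int) = (a : Int) - 1 := by omega
            push_cast [h1]; ring
          have hrange : (a - 1) * N + b + 1 < N * N + 1 := by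
            have := hmul_aux (show a - 1 < N by omega); omega
          have hlt : (a - 1) * N + b < N * N := by
            have := hmul_aux (show a - 1 < N by omega); omega
          rw [hxm, pyGetD_EZ grid N _ _ hrange, zf_full grid (by omega) hb]
          by_cases hq : hsN grid (a - 1) b = true
          · rw [if_pos ⟨by exact_mod_cast Nat.pos_of_ne_zero h0, hq⟩,
              if_pos ⟨h0, hq, hlt⟩, List.nil_append]
          · rw [if_neg (fun hc => hq hc.2), if_neg (fun hc => hq hc.2.1)]
      -- left neighbour (the index x-1 was already rewritten to ↑(a*N+b) by hij1)
      have hleft : ∀ acc : List Int, (if (b : Int) > 0 ∧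
            PySem.List.pyGetD (EZ grid N (N * N)) ((a * N + b : Nat) : Int) false = true
          then acc ++ [((a * N + b : Nat) : Int)] else acc) =
          acc ++ (if b ≠ 0 ∧ hsN grid a (b - 1) = true ∧ a * N + (b - 1) < N * N then
            [((a * N + b : Nat) : Int)] else []) := by
        intro acc
        by_cases h0 : b = 0
        · subst h0
          rw [if_neg (fun hcon => by exact absurd hcon.1 (by norm_num)),
            if_neg (fun hcon => hcon.1 rfl), List.append_nil]
        · have hidx : a * N + b = a * N + (b - 1) + 1 := by omega
          have hrange : a * N + (b - 1) + 1 < N * N + 1 := by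
            have := hmul_aux ha; omega
          have hlt : a * N + (b - 1) < N * N := by have := hmul_aux ha; omega
          rw [show ((a * N + b : Nat) : Int)
              = ((a * N + (b - 1) + 1 : Nat) : Int) from by rw [← hidx],
            pyGetD_EZ grid N _ _ hrange, zf_full grid ha (by omega)]
          by_cases hq : hsN grid a (b - 1) = true
          · rw [if_pos ⟨by exact_mod_cast Nat.pos_of_ne_zero h0, hq⟩,
              if_pos ⟨h0, hq, hlt⟩]
          · rw [if_neg (fun hc => hq hc.2), if_neg (fun hc => hq hc.2.1), List.append_nil]
      -- down neighbour
      have hdown : ∀ acc : List Int, (if (a : Int) < (N : Int) - 1 ∧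
            PySem.List.pyGetD (EZ grid N (N * N)) (((a * N + b + 1 : Nat) : Int) + (N : Int)) false = true
          then acc ++ [((a * N + b + 1 : Nat) : Int) + (N : Int)] else acc) =
          acc ++ (if a + 1 < N ∧ hsN grid (a + 1) b = true ∧ a * N + b < N * N then
            [(((a + 1) * N + b + 1 : Nat) : Int)] else []) := by
        intro acc
        by_cases h0 : a + 1 < N
        · have hxm : ((a * N + b + 1 : Nat) : Int) + (N : Int)
              = (((a + 1) * N + b + 1 : Nat) : Int) := by push_cast; ring
          have hrange : (a + 1) * N + b + 1 < N * N + 1 := by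
            have := hmul_aux h0; omega
          have hlt : a * N + b < N * N := by have := hmul_aux ha; omega
          rw [hxm, pyGetD_EZ grid N _ _ hrange, zf_full grid h0 hb]
          by_cases hq : hsN grid (a + 1) b = true
          · rw [if_pos ⟨by exact_mod_cast (show (a : Int) < (N : Int) - 1 by
                have : (a : Int) + 1 < (N : Int) := by exact_mod_cast h0
                omega), hq⟩,
              if_pos ⟨h0, hq, hlt⟩]
          · rw [if_neg (fun hc => hq hc.2), if_neg (fun hc => hq hc.2.1), List.append_nil]
        · rw [if_neg (fun hcon => h0 (by have := hcon.1; omega)),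
            if_neg (fun hcon => h0 hcon.1), List.append_nil]
      -- right neighbour
      have hright : ∀ acc : List Int, (if (b : Int) < (N : Int) - 1 ∧
            PySem.List.pyGetD (EZ grid N (N * N)) (((a * N + b + 1 : Nat) : Int) + 1) false = true
          then acc ++ [((a * N + b + 1 : Nat) : Int) + 1] else acc) =
          acc ++ (if b + 1 < N ∧ hsN grid a (b + 1) = true ∧ a * N + b < N * N then
            [((a * N + b + 2 : Nat) : Int)] else []) := by
        intro acc
        by_cases h0 : b + 1 < N
        · have hxm : ((a * N + b + 1 : Nat) : Int) + 1
              = ((a * N + (b + 1) + 1 : Nat) : Int) := by push_cast; ring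
          have hrange : a * N + (b + 1) + 1 < N * N + 1 := by
            have := hmul_aux ha; omega
          have hlt : a * N + b < N * N := by have := hmul_aux ha; omega
          have hval : ((a * N + (b + 1) + 1 : Nat) : Int) = ((a * N + b + 2 : Nat) : Int) := by
            rw [show a * N + (b + 1) + 1 = a * N + b + 2 from by omega]
          rw [hxm, pyGetD_EZ grid N _ _ hrange, zf_full grid ha h0]
          by_cases hq : hsN grid a (b + 1) = true
          · rw [if_pos ⟨by exact_mod_cast (show (b : Int) < (N : Int) - 1 by
                have : (b : Int) + 1 < (N : Int) := by exact_mod_cast h0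
                omega), hq⟩,
              if_pos ⟨h0, hq, hlt⟩, hval]
          · rw [if_neg (fun hc => hq hc.2), if_neg (fun hc => hq hc.2.1), List.append_nil]
        · rw [if_neg (fun hcon => h0 (by have := hcon.1; omega)),
            if_neg (fun hcon => h0 hcon.1), List.append_nil]
      rw [hup, hleft, hdown, hright, List.append_assoc, List.append_assoc]
    · rw [if_neg (fun hcon => hg hcon.2), gf_pos grid N _ a b hb, if_neg hg]

-- B's graph fold is the map of pvNbrs over the node range
lemma B_graph_map (n : Int) (house : List Bool) :
    (PySem.List.pyRange 0 (n * n + 1) 1).foldl (fun g v => g ++ [pvNbrs n house v]) [] =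
      (PySem.List.pyRange 0 (n * n + 1) 1).map (pvNbrs n house) := by
  simpa using PySem.List.foldl_append_singleton_eq_map (pvNbrs n house)
    (PySem.List.pyRange 0 (n * n + 1) 1) []

-- ===== VERDICT (by name: the statement is the Claim_ definition above) =====
theorem grid_to_graph_spec : Claim_equal_grid_to_graph := by
  intro n grid _ _
  unfold Spec_grid_to_graph grid_to_graph_alt
  rw [A_split, B_graph_map]
  rcases le_or_gt n 0 with hn | hn
  · rw [PySem.List.pyRange_one_eq_nil hn]
    simp only [List.foldl_nil]
    unfold pvHouseTbl
    rw [if_neg (by omega)]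
    refine Prod.ext ?_ rfl
    unfold pvGraph0
    refine (List.map_congr_left (fun v _ => ?_)).symm
    unfold pvNbrs
    rw [pyGetD_replicate_false]
    rw [if_neg (fun hcon => by simp at hcon)]
  · obtain ⟨N, rfl⟩ := Int.eq_ofNat_of_zero_le hn.le
    have hN : 0 < N := by exact_mod_cast hn
    have hrng : PySem.List.pyRange 0 (N : Int) 1
        = (List.range N).map (fun (k : Nat) => (k : Int)) := PySem.List.pyRange_zero_natCast N
    have hbig : PySem.List.pyRange 0 ((N : Int) * N + 1) 1
        = (List.range (N * N + 1)).map (fun (k : Nat) => (k : Int)) := by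
      rw [show ((N : Int) * N + 1) = ((N * N + 1 : Nat) : Int) from by push_cast; ring]
      exact PySem.List.pyRange_zero_natCast _
    refine Prod.ext ?_ ?_
    · -- graph component
      show (PySem.List.pyRange 0 (N : Int) 1).foldl _ (pvGraph0 (N : Int)) = _
      rw [hrng, hbig, List.foldl_map, List.map_map]
      have hA : List.foldl (fun g (i : Nat) => List.foldl
          (fun g j => pvGStepA (N : Int) grid g i j)
          g ((List.range N).map (fun (k : Nat) => (k : Int)))) (pvGraph0 (N : Int))
          (List.range N) = EA grid N (N * N) := by
        have h := allA grid (N := N) N (le_refl N)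
        rw [EA_zero] at h
        simpa [List.foldl_map] using h
      rw [hA]
      rw [houseTbl_eq grid N hN]
      unfold EA
      exact (List.map_congr_left (fun x hxm => by
        rw [List.mem_range] at hxm
        exact nbrs_eq grid N hN x hxm)).symm
    · -- boolean-table component
      show (PySem.List.pyRange 0 (N : Int) 1).foldl _ (pvZero0 (N : Int)) = _
      rw [hrng, List.foldl_map, houseTbl_eq grid N hN]
      have h := allZ grid (N := N) N (le_refl N)
      rw [EZ_zero] at h
      simpa [List.foldl_map] using h
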